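-- pv_equiv track=rewrite | github.com/nastybcs/AOIS | lab2/models/analyzer.py | get_derivative
-- ===== SOURCE A (Python) =====
-- def get_derivative(current_vector, current_vars, target_var):
--
--     if target_var not in current_vars:
--         return current_vector, current_vars
--     idx = current_vars.index(target_var)
--     n = len(current_vars)
--     step = 1 << (n - 1 - idx)
--     new_vector = []
--     for i in range(len(current_vector)):
--         if (i & step) == 0:
--             val1 = current_vector[i]
--             val2 = current_vector[i + step]
--             new_vector.append(val1 ^ val2)
--     new_vars = [v for v in current_vars if v != target_var]
--     return new_vector, new_vars
-- ===== SOURCE B (Python) =====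
-- def get_derivative(current_vector, current_vars, target_var):
--     if target_var not in current_vars:
--         return current_vector, current_vars
--     step = 1 << (len(current_vars) - 1 - current_vars.index(target_var))
--
--     def go(v):
--         # recursive divide: peel one 2*step block (two half-slices, zipped and xored)
--         if not v:
--             return []
--         return [a ^ b for a, b in zip(v[:step], v[step:2 * step])] + go(v[2 * step:])
--
--     return go(current_vector), [v for v in current_vars if v != target_var]
-- ===== Notes on version B (the rewrite author's own statement) =====
-- stated objective: alternative
-- what changed: Replaces A's indexed scan over range(len) with a bitmask test (i & step) by an index-free recursion that peels one 2*step block at a time, slicing the block into its two halves and zip-xoring them.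
import Mathlib
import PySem

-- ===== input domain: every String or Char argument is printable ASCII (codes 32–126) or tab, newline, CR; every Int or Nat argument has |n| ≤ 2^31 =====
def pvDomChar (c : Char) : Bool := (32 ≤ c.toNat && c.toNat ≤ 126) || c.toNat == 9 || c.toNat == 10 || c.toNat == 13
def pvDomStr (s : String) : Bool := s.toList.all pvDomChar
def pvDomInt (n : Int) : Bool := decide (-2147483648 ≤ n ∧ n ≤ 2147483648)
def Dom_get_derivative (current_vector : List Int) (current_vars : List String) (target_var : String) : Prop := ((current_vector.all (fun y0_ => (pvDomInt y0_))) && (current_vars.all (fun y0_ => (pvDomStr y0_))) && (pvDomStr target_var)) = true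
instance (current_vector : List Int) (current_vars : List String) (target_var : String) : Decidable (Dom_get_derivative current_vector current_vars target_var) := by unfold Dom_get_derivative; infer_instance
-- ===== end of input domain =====

-- B replaces A's indexed bitmask scan by an index-free recursion that peels one 2*step block
-- per call, slicing it into two halves and zip-xoring them (alternative decomposition, same cost).

-- ===== PORT A =====
def get_derivative (current_vector : List Int) (current_vars : List String) (target_var : String) : List Int × List String :=
  if ¬ current_vars.contains target_var then (current_vector, current_vars)
  else
    let idx := (PySem.List.index? current_vars target_var).getD 0
    let n := current_vars.length
    let step := 1 <<< (n - 1 - idx)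
    let new_vector := (List.range current_vector.length).foldl
      (fun acc i =>
        if i &&& step == 0 then
          acc ++ [PySem.Int.bxor (PySem.List.pyGetD current_vector (i : Int) 0)
                                 (PySem.List.pyGetD current_vector ((i : Int) + (step : Int)) 0)]
        else acc) []
    let new_vars := current_vars.filter (fun v => v ≠ target_var)
    (new_vector, new_vars)

-- ===== PORT B =====
-- go(v): peel one 2*step block; Python slices v[:step], v[step:2*step], v[2*step:] with
-- non-negative bounds are exactly take/drop. At every call step = 2^k >= 1, so
-- rest.drop (2*step - 1) = v.drop (2*step), i.e. Python's v[2*step:] (written on the tail,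
-- and with a fuel counter started at v.length, purely so Lean sees termination; fuel never
-- runs out since each call removes at least one element).
def goBF (step : Nat) : Nat → List Int → List Int
  | _, [] => []
  | 0, _ :: _ => []
  | fuel + 1, x :: rest =>
      (((x :: rest).take step).zip (((x :: rest).drop step).take step)).map
        (fun p => PySem.Int.bxor p.1 p.2)
      ++ goBF step fuel (rest.drop (2 * step - 1))

def goB (step : Nat) (v : List Int) : List Int := goBF step v.length v

def get_derivative_alt (current_vector : List Int) (current_vars : List String) (target_var : String) : List Int × List String :=
  if ¬ current_vars.contains target_var then (current_vector, current_vars)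
  else
    let step := 1 <<< (current_vars.length - 1 - ((PySem.List.index? current_vars target_var).getD 0))
    (goB step current_vector, current_vars.filter (fun v => v ≠ target_var))

-- ===== PRECONDITION & SPEC =====
-- Pre_ excludes exactly the inputs where A raises IndexError (vector length not a multiple of
-- 2*step when target_var occurs in current_vars): there current_vector[i + step] overruns.
def Pre_get_derivative (current_vector : List Int) (current_vars : List String) (target_var : String) : Prop :=
  target_var ∉ current_vars ∨
    current_vector.length % (2 * (1 <<< (current_vars.length - 1 - ((PySem.List.index? current_vars target_var).getD 0)))) = 0
instance (current_vector : List Int) (current_vars : List String) (target_var : String) : Decidable (Pre_get_derivative current_vector current_vars target_var) := by unfold Pre_get_derivative; infer_instance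

def pvWitness_get_derivative : List Int × List String × String := ([0, 1, 1, 0], (["a", "b"], "a"))

def Spec_get_derivative (current_vector : List Int) (current_vars : List String) (target_var : String) (out : List Int × List String) : Prop := out = get_derivative_alt current_vector current_vars target_var
instance (current_vector : List Int) (current_vars : List String) (target_var : String) (out : List Int × List String) : Decidable (Spec_get_derivative current_vector current_vars target_var out) := by unfold Spec_get_derivative; infer_instance

-- ===== CLAIM (what is proved, stated in full; the proofs are below) =====
def Claim_equal_get_derivative : Prop := ∀ (current_vector : List Int) (current_vars : List String) (target_var : String), Dom_get_derivative current_vector current_vars target_var → Pre_get_derivative current_vector current_vars target_var → Spec_get_derivative current_vector current_vars target_var (get_derivative current_vector current_vars target_var)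

-- ===== LEMMAS AND PROOFS =====

-- i & 2^k == 0  ⟺  the offset of i inside its 2^(k+1)-block is below 2^k
lemma pv_mask (k i : Nat) : ((i &&& 2 ^ k == 0) : Bool) = decide (i % (2 * 2 ^ k) < 2 ^ k) := by
  have hp : 0 < 2 ^ k := Nat.two_pow_pos k
  have hand := Nat.and_two_pow i k
  have hmod : i % (2 ^ k * 2) = i % 2 ^ k + 2 ^ k * (i / 2 ^ k % 2) := Nat.mod_mul
  have hlt : i % 2 ^ k < 2 ^ k := Nat.mod_lt _ hp
  have hb : Nat.testBit i k = decide (i / 2 ^ k % 2 = 1) := Nat.testBit_eq_decide_div_mod_eq ..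
  cases h : Nat.testBit i k with
  | false =>
    rw [h] at hand hb
    have h0 : i / 2 ^ k % 2 = 0 := by
      rcases Nat.mod_two_eq_zero_or_one (i / 2 ^ k) with h0 | h1
      · exact h0
      · simp [h1] at hb
    simp only [Bool.toNat_false, zero_mul] at hand
    rw [mul_comm 2 (2 ^ k)]
    simp [hand, hmod, h0, hlt]
  | true =>
    rw [h] at hand hb
    have h1 : i / 2 ^ k % 2 = 1 := by simpa using hb.symm
    have hn : ¬ (i % (2 ^ k * 2) < 2 ^ k) := by rw [hmod, h1]; omega
    simp only [Bool.toNat_true, one_mul] at hand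
    rw [mul_comm 2 (2 ^ k)]
    simp [hand, hn]

lemma pv_filter_range_lt (s : Nat) :
    (List.range (2 * s)).filter (fun i => decide (i < s)) = List.range s := by
  rw [two_mul, List.range_add, List.filter_append, List.filter_map]
  have h1 : (List.range s).filter (fun i => decide (i < s)) = List.range s :=
    List.filter_eq_self.mpr (by intro a ha; simpa using List.mem_range.mp ha)
  have h2 : (List.range s).filter ((fun i => decide (i < s)) ∘ (s + ·)) = [] :=
    List.filter_eq_nil_iff.mpr (by intro a ha; simp)
  simp [h1, h2]

-- A side: bitmask-filtered pass over q blocks = flatMap over block starts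
lemma pv_blocks {α : Type} (f : Nat → α) (s q : Nat) :
    ((List.range (q * (2 * s))).filter (fun i => decide (i % (2 * s) < s))).map f
      = (List.range' 0 q (2 * s)).flatMap (fun bs => (List.range s).map (fun j => f (bs + j))) := by
  induction q with
  | zero => simp
  | succ q ih =>
    have hsplit : (q + 1) * (2 * s) = q * (2 * s) + 2 * s := by ring
    rw [hsplit, List.range_add, List.filter_append, List.filter_map, List.map_append,
        List.range'_concat, List.flatMap_append, ih]
    congr 1
    rw [List.map_map]
    have h : (List.range (2 * s)).filter ((fun i => decide (i % (2 * s) < s)) ∘ (q * (2 * s) + ·))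
        = List.range s := by
      rw [List.filter_congr (q := fun i => decide (i < s))]
      · exact pv_filter_range_lt s
      · intro i hi
        have hi' := List.mem_range.mp hi
        simp [Function.comp, Nat.mod_eq_of_lt hi']
    rw [h]
    simp [Function.comp, Nat.mul_comm (2 * s) q]

lemma pv_getD_drop (l : List Int) (a j : Nat) (d : Int) :
    (l.drop a).getD j d = l.getD (a + j) d := by
  simp [List.getD_eq_getElem?_getD, List.getElem?_drop]

-- one block: zip of the two half-slices, xored, as a map over range
lemma pv_block (v : List Int) (s : Nat) (h : 2 * s ≤ v.length) :
    ((v.take s).zip ((v.drop s).take s)).map (fun p => PySem.Int.bxor p.1 p.2)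
      = (List.range s).map (fun j => PySem.Int.bxor (v.getD j 0) (v.getD (j + s) 0)) := by
  apply List.ext_getElem
  · simp; omega
  · intro i h1 h2
    have hi : i < s := by simpa using h2
    have his : i < v.length := by omega
    have his2 : s + i < v.length := by omega
    simp [List.getElem_zip, List.getElem_take, List.getElem_drop,
          List.getD_eq_getElem?_getD, his, his2, Nat.add_comm i s]

-- B side: the peeling recursion computes the same flatMap over block starts
lemma pv_goBF (s : Nat) (hs : 0 < s) (q : Nat) :
    ∀ (fuel : Nat) (v : List Int) (a : Nat), v.length = a + q * (2 * s) → q * (2 * s) ≤ fuel →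
      goBF s fuel (v.drop a)
        = (List.range' a q (2 * s)).flatMap (fun bs => (List.range s).map (fun j =>
            PySem.Int.bxor (v.getD (bs + j) 0) (v.getD (bs + j + s) 0))) := by
  induction q with
  | zero =>
    intro fuel v a hlen _
    have h0 : v.drop a = [] := List.drop_eq_nil_of_le (by omega)
    rw [h0]
    cases fuel <;> simp [goBF]
  | succ q ih =>
    intro fuel v a hlen hfuel
    have hm : (q + 1) * (2 * s) = q * (2 * s) + 2 * s := by ring
    rw [hm] at hlen hfuel
    have hdlen : (v.drop a).length = q * (2 * s) + 2 * s := by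
      rw [List.length_drop, hlen, Nat.add_sub_cancel_left]
    have hne : v.drop a ≠ [] := by
      intro h; rw [h] at hdlen; simp at hdlen; omega
    obtain ⟨x, rest, hxr⟩ := List.exists_cons_of_ne_nil hne
    obtain ⟨f, rfl⟩ : ∃ f, fuel = f + 1 := ⟨fuel - 1, by omega⟩
    have hrest : rest.drop (2 * s - 1) = v.drop (a + 2 * s) := by
      have h1 : (x :: rest).drop (2 * s) = rest.drop (2 * s - 1) := by
        have h2 : 2 * s = (2 * s - 1) + 1 := by omega
        rw [h2]; simp
      rw [← h1, ← hxr, List.drop_drop, Nat.add_comm]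
    have hrec := ih f v (a + 2 * s) (by omega) (by omega)
    have hblock : (((x :: rest).take s).zip (((x :: rest).drop s).take s)).map
        (fun p => PySem.Int.bxor p.1 p.2)
        = (List.range s).map (fun j =>
            PySem.Int.bxor (v.getD (a + j) 0) (v.getD (a + j + s) 0)) := by
      rw [← hxr, pv_block (v.drop a) s (by omega)]
      apply List.map_congr_left
      intro j _
      rw [pv_getD_drop, pv_getD_drop, Nat.add_assoc]
    rw [hxr]
    simp only [goBF]
    rw [hrest, hrec, hblock, List.range'_succ, List.flatMap_cons]

-- ===== VERDICT (by name: the statement is the Claim_ definition above) =====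
theorem get_derivative_spec : Claim_equal_get_derivative := by
  intro v vars t _ hpre
  unfold Spec_get_derivative get_derivative get_derivative_alt
  by_cases h : vars.contains t
  · simp only [h, not_true_eq_false, if_neg, not_false_eq_true]
    have hmem : t ∈ vars := by simpa using h
    have hmod : v.length % (2 * (1 <<< (vars.length - 1 - ((PySem.List.index? vars t).getD 0)))) = 0 := by
      rcases hpre with h' | h'
      · exact absurd hmem h'
      · exact h'
    set k := vars.length - 1 - ((PySem.List.index? vars t).getD 0) with hk
    have hstep : (1 <<< k) = 2 ^ k := by rw [Nat.shiftLeft_eq, one_mul]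
    rw [hstep] at hmod ⊢
    have hs : 0 < 2 ^ k := Nat.two_pow_pos k
    have hdvd : 2 * 2 ^ k ∣ v.length := Nat.dvd_of_mod_eq_zero hmod
    set q := v.length / (2 * 2 ^ k) with hq
    have hlen : v.length = q * (2 * 2 ^ k) := by
      rw [hq, Nat.div_mul_cancel hdvd]
    -- A side: filtered pass → filter/map → flatMap over blocks
    rw [PySem.List.foldl_append_if]
    have hpred : (fun i => ((i &&& 2 ^ k == 0) : Bool)) = (fun i => decide (i % (2 * 2 ^ k) < 2 ^ k)) :=
      funext (pv_mask k)
    rw [hlen, hpred, pv_blocks]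
    -- B side: peeling recursion → the same flatMap
    show _ = (goB (2 ^ k) v, _)
    have hB := pv_goBF (2 ^ k) hs q v.length v 0 (by omega) (by omega)
    rw [List.drop_zero] at hB
    unfold goB
    rw [hB]
    simp only [List.nil_append, ← Nat.cast_add, PySem.List.pyGetD_natCast]
  · have hnm : t ∉ vars := by simpa using h
    simp [hnm]
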